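-- pv_equiv track=rewrite | github.com/Hanseooo/clarift | backend/src/services/quiz_service.py | distribute_questions
-- ===== SOURCE A (Python) =====
-- def distribute_questions(total: int, types: list[str]) -> dict[str, int]:
--     """
--     Distributes total question count across selected types.
--     MCQ gets the largest share. Other types are distributed evenly.
--     """
--     if not types:
--         return {}
--
--     distribution = {}
--
--     if "mcq" in types and len(types) > 1:
--         mcq_count = max(total // 2, 2)
--         remaining = total - mcq_count
--         other_types = [t for t in types if t != "mcq"]
--         per_other = remaining // len(other_types)
--         remainder = remaining % len(other_types)
--
--         distribution["mcq"] = mcq_count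
--         for i, t in enumerate(other_types):
--             distribution[t] = per_other + (1 if i < remainder else 0)
--     else:
--         per_type = total // len(types)
--         remainder = total % len(types)
--         for i, t in enumerate(types):
--             distribution[t] = per_type + (1 if i < remainder else 0)
--
--     return distribution
-- ===== SOURCE B (Python) =====
-- def distribute_questions(total: int, types: list[str]) -> dict[str, int]:
--     """Greedy running-remainder distribution: each type gets ceil(remaining/left)."""
--     if not types:
--         return {}
--
--     distribution = {}
--
--     def greedy(items, remaining):
--         left = len(items)
--         for t in items:
--             share = -((-remaining) // left)
--             distribution[t] = share
--             remaining -= share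
--             left -= 1
--
--     if "mcq" in types and len(types) > 1:
--         mcq_count = max(total // 2, 2)
--         distribution["mcq"] = mcq_count
--         greedy([t for t in types if t != "mcq"], total - mcq_count)
--     else:
--         greedy(types, total)
--
--     return distribution
-- ===== Notes on version B (the rewrite author's own statement) =====
-- stated objective: alternative
-- what changed: Replaced the precomputed base//remainder indexed scheme (per + 1 if i < remainder) with a greedy running-remainder loop that assigns ceil(remaining/left) to each type while decrementing remaining and left, used uniformly in both branches.
-- outside the precondition, e.g. on distribute_questions(4, ['mcq', 'mcq']): A raises ZeroDivisionError, B returns {'mcq': 2}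
import Mathlib
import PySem

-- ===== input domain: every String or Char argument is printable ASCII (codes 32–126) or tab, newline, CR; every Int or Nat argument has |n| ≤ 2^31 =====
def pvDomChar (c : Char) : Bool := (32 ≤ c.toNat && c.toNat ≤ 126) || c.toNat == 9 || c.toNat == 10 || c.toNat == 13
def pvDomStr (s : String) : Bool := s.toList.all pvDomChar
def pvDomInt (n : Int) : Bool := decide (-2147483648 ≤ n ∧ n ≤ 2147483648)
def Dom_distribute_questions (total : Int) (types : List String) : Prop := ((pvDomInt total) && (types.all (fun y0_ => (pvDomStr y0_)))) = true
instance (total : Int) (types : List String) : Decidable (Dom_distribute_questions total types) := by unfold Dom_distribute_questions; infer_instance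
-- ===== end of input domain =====

-- B replaces A's precomputed base//remainder indexed scheme with a greedy running-remainder
-- loop assigning ceil(remaining/left) per type (alternative decomposition, same cost).

-- ===== PORT A =====
def distribute_questions (total : Int) (types : List String) : List (String × Int) :=
  if types = [] then []
  else
    let distribution : PySem.Dict String Int := PySem.Dict.empty
    if "mcq" ∈ types ∧ 1 < types.length then
      let mcq_count := max (PySem.Int.floordiv total 2) 2
      let remaining := total - mcq_count
      let other_types := types.filter (fun t => t ≠ "mcq")
      let per_other := PySem.Int.floordiv remaining (other_types.length : Int)
      let remainder := PySem.Int.mod remaining (other_types.length : Int)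
      let distribution := distribution.insert "mcq" mcq_count
      let distribution := (PySem.List.enumerate other_types).foldl
        (fun d (it : Int × String) =>
          d.insert it.2 (per_other + (if it.1 < remainder then 1 else 0))) distribution
      distribution.items
    else
      let per_type := PySem.Int.floordiv total (types.length : Int)
      let remainder := PySem.Int.mod total (types.length : Int)
      let distribution := (PySem.List.enumerate types).foldl
        (fun d (it : Int × String) =>
          d.insert it.2 (per_type + (if it.1 < remainder then 1 else 0))) distribution
      distribution.items

-- ===== PORT B =====
-- greedy running-remainder loop: each type gets ceil(remaining/left)
def pvGreedy (d : PySem.Dict String Int) (items : List String) (remaining left : Int) :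
    PySem.Dict String Int :=
  match items with
  | [] => d
  | t :: rest =>
    let share := -(PySem.Int.floordiv (-remaining) left)
    pvGreedy (d.insert t share) rest (remaining - share) (left - 1)

def distribute_questions_alt (total : Int) (types : List String) : List (String × Int) :=
  if types = [] then []
  else if "mcq" ∈ types ∧ 1 < types.length then
    let mcq_count := max (PySem.Int.floordiv total 2) 2
    let others := types.filter (fun t => t ≠ "mcq")
    (pvGreedy (PySem.Dict.empty.insert "mcq" mcq_count) others (total - mcq_count)
      (others.length : Int)).items
  else
    (pvGreedy PySem.Dict.empty types total (types.length : Int)).items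

-- ===== PRECONDITION & SPEC =====
-- Pre_ excludes only the lists of length > 1 whose elements are all "mcq": there A divides by
-- len(other_types) = 0 and raises ZeroDivisionError (B returns {"mcq": max(total//2, 2)} there).
def Pre_distribute_questions (total : Int) (types : List String) : Prop :=
  ¬ ("mcq" ∈ types ∧ 1 < types.length ∧ types.filter (fun t => t ≠ "mcq") = [])
instance (total : Int) (types : List String) : Decidable (Pre_distribute_questions total types) := by
  unfold Pre_distribute_questions; infer_instance

def pvWitness_distribute_questions : Int × List String := (10, ["mcq", "tf", "essay"])

def Spec_distribute_questions (total : Int) (types : List String) (out : List (String × Int)) : Prop :=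
  out = distribute_questions_alt total types
instance (total : Int) (types : List String) (out : List (String × Int)) :
    Decidable (Spec_distribute_questions total types out) := by
  unfold Spec_distribute_questions; infer_instance

-- ===== CLAIM (what is proved, stated in full; the proofs are below) =====
def Claim_equal_distribute_questions : Prop := ∀ (total : Int) (types : List String), Dom_distribute_questions total types → Pre_distribute_questions total types → Spec_distribute_questions total types (distribute_questions total types)

-- ===== LEMMAS AND PROOFS =====

-- The greedy loop of B reproduces A's per/remainder pattern: starting from
-- remaining = per * n + rem with 0 <= rem <= n (n = length), the i-th type
-- (enumerated from s) gets per + (1 if i < s + rem else 0).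
theorem pvGreedy_eq (l : List String) (d : PySem.Dict String Int) (per rem s : Int)
    (h0 : 0 ≤ rem) (hr : rem ≤ (l.length : Int)) :
    pvGreedy d l (per * (l.length : Int) + rem) (l.length : Int) =
      (PySem.List.enumerate l s).foldl
        (fun d (it : Int × String) =>
          d.insert it.2 (per + (if it.1 < s + rem then 1 else 0))) d := by
  induction l generalizing d per rem s with
  | nil =>
    simp only [List.length_nil, Int.natCast_zero, PySem.List.enumerate_nil, List.foldl_nil]
    rfl
  | cons t rest ih =>
    have hn : (0:Int) < ((t :: rest).length : Int) := by
      exact_mod_cast Nat.succ_pos rest.length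
    have hlen : ((t :: rest).length : Int) - 1 = (rest.length : Int) := by
      push_cast [List.length_cons]; ring
    rw [PySem.List.enumerate_cons, List.foldl_cons]
    by_cases hrem : 0 < rem
    · have hshare : -(PySem.Int.floordiv (-(per * ((t :: rest).length : Int) + rem))
          ((t :: rest).length : Int)) = per + 1 :=
        (PySem.Int.neg_floordiv_neg_eq_iff_of_pos hn).mpr ⟨by nlinarith, by nlinarith⟩
      simp only [pvGreedy, hshare]
      rw [if_pos (show s < s + rem by omega)]
      have harg : per * ((t :: rest).length : Int) + rem - (per + 1)
          = per * ((rest.length : Int)) + (rem - 1) := by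
        push_cast [List.length_cons]; ring
      rw [harg, hlen, ih (d.insert t (per + 1)) per (rem - 1) (s + 1) (by omega)
        (by push_cast [List.length_cons] at hr ⊢; omega)]
      have hc : s + 1 + (rem - 1) = s + rem := by ring
      simp only [hc]
    · have hrem0 : rem = 0 := by omega
      subst hrem0
      have hshare : -(PySem.Int.floordiv (-(per * ((t :: rest).length : Int) + 0))
          ((t :: rest).length : Int)) = per :=
        (PySem.Int.neg_floordiv_neg_eq_iff_of_pos hn).mpr ⟨by nlinarith, by nlinarith⟩
      simp only [pvGreedy, hshare]
      rw [if_neg (show ¬ s < s + 0 by omega), add_zero]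
      have harg : per * ((t :: rest).length : Int) - per
          = per * ((rest.length : Int)) + 0 := by
        push_cast [List.length_cons]; ring
      rw [harg, hlen, ih (d.insert t per) per 0 (s + 1) le_rfl (by positivity)]
      simp only [add_zero]
      apply PySem.List.foldl_congr_mem
      intro acc it hit
      have hge : s + 1 ≤ it.1 := by
        have hm : it.1 ∈ List.map (fun x => x.1) (PySem.List.enumerate rest (s + 1)) :=
          List.mem_map_of_mem hit
        rw [PySem.List.map_fst_enumerate] at hm
        exact (PySem.List.mem_pyRange_one.mp hm).1
      rw [if_neg (by omega), if_neg (by omega)]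

-- floordiv/mod recombine into the dividend, with the mod bounds, for a positive length
theorem pvSplit (R : Int) (n : Nat) (hn : 0 < n) :
    PySem.Int.floordiv R (n : Int) * (n : Int) + PySem.Int.mod R (n : Int) = R ∧
      0 ≤ PySem.Int.mod R (n : Int) ∧ PySem.Int.mod R (n : Int) < (n : Int) := by
  have hpos : (0:Int) < (n : Int) := by exact_mod_cast hn
  exact ⟨PySem.Int.floordiv_mul_add_mod R _, PySem.Int.mod_nonneg R hpos,
    PySem.Int.mod_lt R hpos⟩

-- ===== VERDICT (by name: the statement is the Claim_ definition above) =====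
theorem distribute_questions_spec : Claim_equal_distribute_questions := by
  intro total types _ hpre
  unfold Spec_distribute_questions distribute_questions distribute_questions_alt
  by_cases hnil : types = []
  · simp [hnil]
  · by_cases hbr : "mcq" ∈ types ∧ 1 < types.length
    · simp only [hnil, hbr.1, hbr.2, if_false, and_self, if_true]
      set others := types.filter (fun t => t ≠ "mcq") with hoth
      have hone : others ≠ [] := by
        intro h; exact hpre ⟨hbr.1, hbr.2, by rw [← hoth]; exact h⟩
      have hlen : 0 < others.length := List.length_pos_of_ne_nil hone
      obtain ⟨heq, h0, hlt⟩ := pvSplit (total - max (PySem.Int.floordiv total 2) 2)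
        others.length hlen
      have key := pvGreedy_eq others
        (PySem.Dict.empty.insert "mcq" (max (PySem.Int.floordiv total 2) 2))
        (PySem.Int.floordiv (total - max (PySem.Int.floordiv total 2) 2) (others.length : Int))
        (PySem.Int.mod (total - max (PySem.Int.floordiv total 2) 2) (others.length : Int))
        0 h0 (le_of_lt hlt)
      rw [heq] at key
      simp only [zero_add] at key
      rw [key]
    · simp only [hnil, hbr, if_false]
      have hlen : 0 < types.length := List.length_pos_of_ne_nil hnil
      obtain ⟨heq, h0, hlt⟩ := pvSplit total types.length hlen
      have key := pvGreedy_eq types PySem.Dict.empty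
        (PySem.Int.floordiv total (types.length : Int))
        (PySem.Int.mod total (types.length : Int)) 0 h0 (le_of_lt hlt)
      rw [heq] at key
      simp only [zero_add] at key
      rw [key]
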